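-- pv_equiv track=rewrite | github.com/lojikil/advent | 2024/7/7.py | compute
-- ===== SOURCE A (Python) =====
-- def compute(nums, ops):
--     res = nums[0]
--     nums = nums[1:]
--     idx = 0
--     for op in ops:
--         if op == '+':
--             res += nums[idx]
--         elif op == '*':
--             res *= nums[idx]
--         idx += 1
--     return res
-- ===== SOURCE B (Python) =====
-- def compute(nums, ops):
--     # Right-to-left pass: compose the +/* steps into a single affine map
--     # x |-> a*x + b over the initial value, then apply it to nums[0].
--     a, b = 1, 0
--     for i in reversed(range(len(ops))):
--         op = ops[i]
--         if op == '+':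
--             b += a * nums[1 + i]
--         elif op == '*':
--             a *= nums[1 + i]
--     return a * nums[0] + b
-- ===== Notes on version B (the rewrite author's own statement) =====
-- stated objective: alternative
-- what changed: Instead of a left-to-right running accumulator, B walks the ops right-to-left composing each +/* step into a single affine map (a,b) and finally returns a*nums[0]+b; correctness follows because each step is an affine function of the running value and affine maps compose.
import Mathlib
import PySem

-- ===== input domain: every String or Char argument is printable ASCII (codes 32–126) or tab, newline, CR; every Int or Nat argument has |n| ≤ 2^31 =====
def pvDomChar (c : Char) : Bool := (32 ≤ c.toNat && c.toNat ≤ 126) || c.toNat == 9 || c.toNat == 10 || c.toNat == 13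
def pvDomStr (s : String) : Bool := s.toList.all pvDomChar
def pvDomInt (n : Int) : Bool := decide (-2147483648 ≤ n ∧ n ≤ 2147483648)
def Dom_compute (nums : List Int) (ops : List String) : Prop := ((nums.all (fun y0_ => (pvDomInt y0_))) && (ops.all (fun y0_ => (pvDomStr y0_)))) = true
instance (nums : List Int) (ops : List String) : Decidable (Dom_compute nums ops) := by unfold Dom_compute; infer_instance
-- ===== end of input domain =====

-- B replaces A's left-to-right running accumulator by a right-to-left pass that composes the
-- +/* steps into one affine map (a,b) and returns a*nums[0]+b; return values agree on Pre_.

-- ===== PORT A =====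
def compute (nums : List Int) (ops : List String) : Int :=
  let res := (PySem.List.pyGet? nums 0).getD 0        -- res = nums[0]
  let nums1 := PySem.List.slice nums (some 1) none    -- nums = nums[1:]
  (ops.foldl (fun (st : Int × Int) op =>
      if op = "+" then (st.1 + (PySem.List.pyGet? nums1 st.2).getD 0, st.2 + 1)
      else if op = "*" then (st.1 * (PySem.List.pyGet? nums1 st.2).getD 0, st.2 + 1)
      else (st.1, st.2 + 1)) (res, 0)).1

-- ===== PORT B =====
-- for i in reversed(range(len(ops))): the loop indices are (List.range ops.length).reverse;
-- ops[i] and nums[1+i] are in range on every input Pre_ admits, so getD is exact there.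
def compute_alt (nums : List Int) (ops : List String) : Int :=
  let st := ((List.range ops.length).reverse).foldl
    (fun (st : Int × Int) i =>
      let op := ops.getD i ""
      if op = "+" then (st.1, st.2 + st.1 * nums.getD (1 + i) 0)
      else if op = "*" then (st.1 * nums.getD (1 + i) 0, st.2)
      else st) (1, 0)
  st.1 * nums.getD 0 0 + st.2

-- ===== PRECONDITION & SPEC =====
-- Pre_ excludes exactly the inputs where Python A raises IndexError: an empty nums, or a
-- '+'/'*' op whose operand index reaches past the end of nums.
def Pre_compute (nums : List Int) (ops : List String) : Prop :=
  nums ≠ [] ∧ ∀ i : Nat, i < ops.length → (ops.getD i "" = "+" ∨ ops.getD i "" = "*") → i + 1 < nums.length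
instance (nums : List Int) (ops : List String) : Decidable (Pre_compute nums ops) := by unfold Pre_compute; infer_instance
def pvWitness_compute : List Int × List String := ([2, 3, 4], ["+", "*"])

def Spec_compute (nums : List Int) (ops : List String) (out : Int) : Prop := out = compute_alt nums ops
instance (nums : List Int) (ops : List String) (out : Int) : Decidable (Spec_compute nums ops out) := by unfold Spec_compute; infer_instance

-- ===== CLAIM (what is proved, stated in full; the proofs are below) =====
def Claim_equal_compute : Prop := ∀ (nums : List Int) (ops : List String), Dom_compute nums ops → Pre_compute nums ops → Spec_compute nums ops (compute nums ops)

-- ===== LEMMAS AND PROOFS =====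

-- A's indexed walk from position k equals a suffix-consuming left evaluation over (t.drop k).
theorem compute_loop_agree (ops : List String) (t : List Int) (r : Int) (k : Nat) :
    (ops.foldl (fun (st : Int × Int) op =>
      if op = "+" then (st.1 + (PySem.List.pyGet? t st.2).getD 0, st.2 + 1)
      else if op = "*" then (st.1 * (PySem.List.pyGet? t st.2).getD 0, st.2 + 1)
      else (st.1, st.2 + 1)) (r, (k : Int))).1
    = (ops.foldl (fun (st : Int × List Int) op =>
      let n := st.2.head?.getD 0
      if op = "+" then (st.1 + n, st.2.tail)
      else if op = "*" then (st.1 * n, st.2.tail)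
      else (st.1, st.2.tail)) (r, t.drop k)).1 := by
  induction ops generalizing r k with
  | nil => rfl
  | cons op ops ih =>
    have hget : (PySem.List.pyGet? t (k : Int)).getD 0 = (t.drop k).head?.getD 0 := by
      simp [PySem.List.pyGet?_natCast, List.head?_drop]
    have hk1 : (k : Int) + 1 = ((k + 1 : Nat) : Int) := by push_cast; ring
    have htail : (t.drop k).tail = t.drop (k + 1) := by rw [List.tail_drop]
    simp only [List.foldl_cons]
    split_ifs with h1 h2 <;> simp only [hget, hk1, htail] <;> exact ih _ _

-- The suffix-consuming left evaluation of ops.drop j (operands nums.drop (j+1)) starting at r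
-- equals applying the affine map B folds up (right-to-left over the indices j..j+m-1) to r.
theorem compute_affine_agree (nums : List Int) (ops : List String) :
    ∀ (m j : Nat) (r : Int), m + j = ops.length →
    ((ops.drop j).foldl (fun (st : Int × List Int) op =>
      let n := st.2.head?.getD 0
      if op = "+" then (st.1 + n, st.2.tail)
      else if op = "*" then (st.1 * n, st.2.tail)
      else (st.1, st.2.tail)) (r, nums.drop (j + 1))).1
    = (((List.range m).map (· + j)).foldr (fun i (st : Int × Int) =>
        let op := ops.getD i ""
        if op = "+" then (st.1, st.2 + st.1 * nums.getD (1 + i) 0)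
        else if op = "*" then (st.1 * nums.getD (1 + i) 0, st.2)
        else st) (1, 0)).1 * r
      + (((List.range m).map (· + j)).foldr (fun i (st : Int × Int) =>
        let op := ops.getD i ""
        if op = "+" then (st.1, st.2 + st.1 * nums.getD (1 + i) 0)
        else if op = "*" then (st.1 * nums.getD (1 + i) 0, st.2)
        else st) (1, 0)).2 := by
  intro m
  induction m with
  | zero =>
    intro j r hm
    simp at hm
    simp [hm]
  | succ m ih =>
    intro j r hm
    have hj : j < ops.length := by omega
    have hdrop : ops.drop j = ops[j] :: ops.drop (j + 1) :=
      (List.drop_eq_getElem_cons hj)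
    have hrange : (List.range (m + 1)).map (· + j)
        = j :: (List.range m).map (· + (j + 1)) := by
      rw [List.range_succ_eq_map]
      simp [List.map_map, Function.comp]
      intros
      omega
    have hopj : ops.getD j "" = ops[j] := by
      simp [List.getD, hj]
    have hhead : (nums.drop (j + 1)).head?.getD 0 = nums.getD (1 + j) 0 := by
      rw [List.head?_drop]
      have : 1 + j = j + 1 := by omega
      simp [this, List.getD]
    have htail : (nums.drop (j + 1)).tail = nums.drop (j + 1 + 1) := by
      rw [List.tail_drop]
    have hm' : m + (j + 1) = ops.length := by omega
    rw [hdrop, hrange]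
    simp only [List.foldl_cons, List.foldr_cons, hopj, hhead, htail]
    split_ifs with h1 h2 <;>
      rw [show j + 1 + 1 = (j + 1) + 1 from rfl] <;>
      rw [ih (j + 1) _ hm'] <;> ring

-- ===== VERDICT (by name: the statement is the Claim_ definition above) =====
theorem compute_spec : Claim_equal_compute := by
  intro nums ops _ _
  unfold Spec_compute compute compute_alt
  have h0 : (PySem.List.pyGet? nums 0).getD 0 = nums.getD 0 0 := by
    simp [PySem.List.pyGet?_zero, List.getD]
  have h1 : PySem.List.slice nums (some 1) none = nums.tail := PySem.List.slice_from_one nums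
  rw [h0, h1, List.foldl_reverse]
  have hA := compute_loop_agree ops nums.tail (nums.getD 0 0) 0
  simp only [Nat.cast_zero, List.drop_zero] at hA
  rw [hA]
  have key := compute_affine_agree nums ops ops.length 0 (nums.getD 0 0) (by omega)
  simp only [List.drop_zero, Nat.add_zero, List.map_id', show (0 : Nat) + 1 = 1 from rfl,
    List.drop_one] at key
  simpa using key
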